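-- pv_equiv track=rewrite | github.com/janek37/advent-of-code | 2022/day15.py | impossible_beacon_locations
-- ===== SOURCE A (Python) =====
-- from typing import Iterable
--
-- Position = tuple[int, int]
--
-- def impossible_beacon_locations(sensors_beacons: Iterable[tuple[Position, Position]], y: int) -> int:
--     known_beacon_positions = set()
--     impossible_x_intervals = []
--     for sensor, beacon in sensors_beacons:
--         if beacon[1] == y:
--             known_beacon_positions.add(beacon[0])
--         distance = manhattan_distance(sensor, beacon)
--         distance_to_y = abs(sensor[1] - y)
--         if distance_to_y <= distance:
--             radius = distance - distance_to_y
--             impossible_x_intervals.append((sensor[0] - radius, sensor[0] + radius))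
--     joined_intervals = get_joined_intervals(impossible_x_intervals)
--     return sum(end - start + 1 for start, end in joined_intervals) - len(known_beacon_positions)
--
-- def manhattan_distance(p1: Position, p2: Position) -> int:
--     return abs(p1[0] - p2[0]) + abs(p1[1] - p2[1])
--
-- def get_joined_intervals(intervals: Iterable[tuple[int, int]]) -> list[tuple[int, int]]:
--     joined_intervals = []
--     for min_diff, max_diff in sorted(intervals):
--         if not joined_intervals:
--             joined_intervals.append((min_diff, max_diff))
--         else:
--             last_interval = joined_intervals[-1]
--             if min_diff > last_interval[1] + 1:
--                 joined_intervals.append((min_diff, max_diff))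
--             elif max_diff > last_interval[1]:
--                 joined_intervals[-1] = (last_interval[0], max_diff)
--     return joined_intervals
-- ===== SOURCE B (Python) =====
-- def impossible_beacon_locations(sensors_beacons, y):
--     pairs = list(sensors_beacons)
--     beacons = {bx for _, (bx, by) in pairs if by == y}
--     events = []
--     for (sx, sy), (bx, by) in pairs:
--         r = abs(sx - bx) + abs(sy - by) - abs(sy - y)
--         if r >= 0:
--             events.append((sx - r, 1))
--             events.append((sx + r + 1, -1))
--     events.sort()
--     total = 0
--     depth = 0
--     start = 0
--     for x, d in events:
--         if depth == 0:
--             start = x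
--         depth += d
--         if depth == 0:
--             total += x - start
--     return total - len(beacons)
-- ===== Notes on version B (the rewrite author's own statement) =====
-- stated objective: alternative
-- what changed: B replaces A's sort-and-merge of inclusive intervals (build a joined-interval list, then sum its lengths) by a sweep line over +1/-1 boundary events: each sensor contributes events (lo, +1) and (hi+1, -1), the events are sorted and scanned once with a running coverage depth, adding a segment length each time the depth returns to zero; no interval list is merged or kept.
import Mathlib
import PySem

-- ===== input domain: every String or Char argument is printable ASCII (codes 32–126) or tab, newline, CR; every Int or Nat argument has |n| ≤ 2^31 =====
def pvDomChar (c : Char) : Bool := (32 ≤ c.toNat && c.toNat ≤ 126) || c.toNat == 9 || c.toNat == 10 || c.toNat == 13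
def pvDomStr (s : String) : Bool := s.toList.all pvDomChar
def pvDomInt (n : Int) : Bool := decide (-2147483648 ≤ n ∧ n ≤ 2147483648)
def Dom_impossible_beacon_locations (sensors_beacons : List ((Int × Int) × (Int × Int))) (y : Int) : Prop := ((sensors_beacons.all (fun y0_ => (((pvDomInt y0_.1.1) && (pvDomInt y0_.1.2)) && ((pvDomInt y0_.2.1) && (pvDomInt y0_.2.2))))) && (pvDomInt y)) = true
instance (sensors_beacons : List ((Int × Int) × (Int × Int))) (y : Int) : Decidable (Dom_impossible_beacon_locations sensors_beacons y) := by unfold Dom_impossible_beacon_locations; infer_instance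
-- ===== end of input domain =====

-- B replaces A's sort-and-merge of inclusive intervals by a sweep line over +1/-1 boundary
-- events sorted once and scanned with a running coverage depth; same return value.

-- ===== PORT A =====
def pvManhattan (p1 p2 : Int × Int) : Int := |p1.1 - p2.1| + |p1.2 - p2.2|

def pvJoinStep (jl : List (Int × Int)) (iv : Int × Int) : List (Int × Int) :=
  match jl.getLast? with
  | none => [iv]
  | some last =>
    if iv.1 > last.2 + 1 then jl ++ [iv]
    else if iv.2 > last.2 then jl.dropLast ++ [(last.1, iv.2)]
    else jl

def pvGetJoinedIntervals (intervals : List (Int × Int)) : List (Int × Int) :=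
  (PySem.List.sorted2 intervals (·.1) (·.2)).foldl pvJoinStep []

def impossible_beacon_locations (sensors_beacons : List ((Int × Int) × (Int × Int))) (y : Int) : Int :=
  let st := sensors_beacons.foldl
    (fun (st : PySem.Set Int × List (Int × Int)) sb =>
      let sensor := sb.1
      let beacon := sb.2
      let kb := if beacon.2 == y then PySem.Set.add st.1 beacon.1 else st.1
      let distance := pvManhattan sensor beacon
      let distance_to_y := |sensor.2 - y|
      let ivs := if distance_to_y ≤ distance then
          st.2 ++ [(sensor.1 - (distance - distance_to_y), sensor.1 + (distance - distance_to_y))]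
        else st.2
      (kb, ivs))
    (PySem.Set.empty, [])
  let joined := pvGetJoinedIntervals st.2
  (joined.foldl (fun s iv => s + (iv.2 - iv.1 + 1)) 0) - PySem.Set.len st.1

-- ===== PORT B =====
def impossible_beacon_locations_alt (sensors_beacons : List ((Int × Int) × (Int × Int))) (y : Int) : Int :=
  let beacons : PySem.Set Int :=
    PySem.Set.ofList ((sensors_beacons.filter (fun p => p.2.2 == y)).map (fun p => p.2.1))
  let events := sensors_beacons.foldl
    (fun (acc : List (Int × Int)) p =>
      let r := |p.1.1 - p.2.1| + |p.1.2 - p.2.2| - |p.1.2 - y|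
      if r ≥ 0 then acc ++ [(p.1.1 - r, 1)] ++ [(p.1.1 + r + 1, -1)] else acc) []
  let es := PySem.List.sorted2 events (·.1) (·.2)
  let st := es.foldl
    (fun (st : Int × Int × Int) e =>
      let start := if st.2.1 == 0 then e.1 else st.2.2
      let depth := st.2.1 + e.2
      let total := if depth == 0 then st.1 + (e.1 - start) else st.1
      (total, depth, start))
    (0, 0, 0)
  st.1 - PySem.Set.len beacons

-- ===== PRECONDITION & SPEC =====
def Spec_impossible_beacon_locations (sensors_beacons : List ((Int × Int) × (Int × Int))) (y : Int) (out : Int) : Prop := out = impossible_beacon_locations_alt sensors_beacons y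
instance (sensors_beacons : List ((Int × Int) × (Int × Int))) (y : Int) (out : Int) : Decidable (Spec_impossible_beacon_locations sensors_beacons y out) := by unfold Spec_impossible_beacon_locations; infer_instance

-- ===== CLAIM (what is proved, stated in full; the proofs are below) =====
def Claim_equal_impossible_beacon_locations : Prop := ∀ (sensors_beacons : List ((Int × Int) × (Int × Int))) (y : Int), Dom_impossible_beacon_locations sensors_beacons y → Spec_impossible_beacon_locations sensors_beacons y (impossible_beacon_locations sensors_beacons y)

-- ===== LEMMAS AND PROOFS =====

-- B's sweep step, named for the lemmas (definitionally B's foldl lambda)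
def pvSweepStep (st : Int × Int × Int) (e : Int × Int) : Int × Int × Int :=
  let start := if st.2.1 == 0 then e.1 else st.2.2
  let depth := st.2.1 + e.2
  let total := if depth == 0 then st.1 + (e.1 - start) else st.1
  (total, depth, start)

-- A's inline merge state step, used as intermediate characterisation of A's merge fold
def pvMergeStep (st : Int × Option Int) (iv : Int × Int) : Int × Option Int :=
  let cut := match st.2 with | none => iv.1 | some e => max iv.1 (e + 1)
  let t := if iv.2 ≥ cut then st.1 + (iv.2 - cut + 1) else st.1
  let e' := match st.2 with
    | none => some iv.2
    | some e => if iv.2 > e then some iv.2 else st.2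
  (t, e')

def pvEv (iv : Int × Int) : List (Int × Int) := [(iv.1, 1), (iv.2 + 1, -1)]

def sumD (l : List (Int × Int)) : Int := (l.map Prod.snd).sum

def gsum : List (Int × Int) → Int → Int
  | [], _ => 0
  | [_], _ => 0
  | (x1, _d1) :: (x2, d2) :: r, d =>
      (if 0 < d + _d1 then x2 - x1 else 0) + gsum ((x2, d2) :: r) (d + _d1)

def covN (ivs : List (Int × Int)) (x : Int) : Nat :=
  ivs.countP (fun iv => decide (iv.1 ≤ x ∧ x ≤ iv.2))

def cAt (es : List (Int × Int)) (d0 x : Int) : Int :=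
  d0 + sumD (es.filter (fun e => decide (e.1 ≤ x)))

def headX (es : List (Int × Int)) : Int := match es with | [] => 0 | e :: _ => e.1
def lastX (es : List (Int × Int)) : Int := match es.getLast? with | some e => e.1 | none => 0

def lexLe (a b : Int × Int) : Prop := a.1 < b.1 ∨ (a.1 = b.1 ∧ a.2 ≤ b.2)

def pvSumLen (jl : List (Int × Int)) : Int := (jl.map (fun iv => iv.2 - iv.1 + 1)).sum

-- the correspondence between A's joined-interval state and the inline (total, end) state
def pvRel (jl : List (Int × Int)) (st : Int × Option Int) : Prop :=
  pvSumLen jl = st.1 ∧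
  ((jl = [] ∧ st.2 = none) ∨ (∃ last, jl.getLast? = some last ∧ st.2 = some last.2))

lemma pv_step (iv : Int × Int) (hiv : iv.1 ≤ iv.2) (jl : List (Int × Int)) (st : Int × Option Int)
    (h : pvRel jl st) : pvRel (pvJoinStep jl iv) (pvMergeStep st iv) := by
  obtain ⟨hsum, hrest⟩ := h
  rcases hrest with ⟨hjl, he⟩ | ⟨last, hlast, he⟩
  · subst hjl
    have h0 : st.1 = 0 := by simpa [pvSumLen] using hsum.symm
    refine ⟨?_, Or.inr ⟨iv, by simp [pvJoinStep], by simp [pvMergeStep, he]⟩⟩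
    simp only [pvJoinStep, List.getLast?_nil, pvMergeStep, he, if_pos hiv, h0, pvSumLen,
      List.map_cons, List.map_nil, List.sum_cons, List.sum_nil]
    omega
  · have hne : jl ≠ [] := by intro h; rw [h] at hlast; simp at hlast
    have hgl : jl.getLast hne = last := by
      have := List.getLast?_eq_some_getLast hne
      rw [hlast] at this
      exact (Option.some_inj.mp this).symm
    have hdecomp : jl.dropLast ++ [last] = jl := by
      rw [← hgl]; exact List.dropLast_append_getLast hne
    have hsplit : pvSumLen jl = pvSumLen jl.dropLast + (last.2 - last.1 + 1) := by
      conv_lhs => rw [← hdecomp]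
      simp [pvSumLen]
    simp only [pvJoinStep, hlast, pvMergeStep, he]
    by_cases h1 : iv.1 > last.2 + 1
    · rw [if_pos h1]
      have hcut : max iv.1 (last.2 + 1) = iv.1 := by omega
      refine ⟨?_, Or.inr ⟨iv, List.getLast?_concat, by rw [if_pos (by omega : iv.2 > last.2)]⟩⟩
      rw [hcut, if_pos hiv]
      simp only [pvSumLen, List.map_append, List.sum_append, List.map_cons, List.map_nil,
        List.sum_cons, List.sum_nil] at hsum ⊢
      omega
    · rw [if_neg h1]
      have hcut : max iv.1 (last.2 + 1) = last.2 + 1 := by omega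
      by_cases h2 : iv.2 > last.2
      · rw [if_pos h2, hcut, if_pos (by omega : iv.2 ≥ last.2 + 1)]
        refine ⟨?_, Or.inr ⟨(last.1, iv.2), List.getLast?_concat, by rw [if_pos h2]⟩⟩
        have : pvSumLen (jl.dropLast ++ [(last.1, iv.2)])
            = pvSumLen jl.dropLast + (iv.2 - last.1 + 1) := by simp [pvSumLen]
        rw [this]
        omega
      · rw [if_neg h2, hcut, if_neg (by omega : ¬ iv.2 ≥ last.2 + 1)]
        exact ⟨hsum, Or.inr ⟨last, hlast, by rw [if_neg h2]⟩⟩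

lemma pv_sweep_rel (l : List (Int × Int)) (hl : ∀ p ∈ l, p.1 ≤ p.2)
    (jl : List (Int × Int)) (st : Int × Option Int) (h : pvRel jl st) :
    pvRel (l.foldl pvJoinStep jl) (l.foldl pvMergeStep st) := by
  induction l generalizing jl st with
  | nil => exact h
  | cons iv tl ih =>
    exact ih (fun p hp => hl p (List.mem_cons_of_mem _ hp)) _ _
      (pv_step iv (hl iv (List.mem_cons_self ..)) jl st h)

lemma pv_sumlen_foldl (jl : List (Int × Int)) :
    jl.foldl (fun s iv => s + (iv.2 - iv.1 + 1)) 0 = pvSumLen jl := by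
  have key : ∀ (a : Int), jl.foldl (fun s iv => s + (iv.2 - iv.1 + 1)) a = a + pvSumLen jl := by
    induction jl with
    | nil => intro a; simp [pvSumLen]
    | cons h t ih =>
      intro a
      simp only [List.foldl_cons, ih, pvSumLen, List.map_cons, List.sum_cons]
      ring
  simpa using key 0

-- A's conditional-add loop over the pairs builds exactly set(comprehension) of B.
lemma pv_set_eq (y : Int) (sb : List ((Int × Int) × (Int × Int))) (s : PySem.Set Int) :
    sb.foldl (fun s p => if p.2.2 == y then PySem.Set.add s p.2.1 else s) s
    = ((sb.filter (fun p => p.2.2 == y)).map (fun p => p.2.1)).foldl PySem.Set.add s := by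
  induction sb generalizing s with
  | nil => rfl
  | cons hd tl ih =>
    simp only [List.foldl_cons, List.filter_cons]
    by_cases h : (hd.2.2 == y) = true
    · rw [if_pos h]
      simp only [h, if_true, List.map_cons, List.foldl_cons]
      exact ih _
    · rw [if_neg h]
      simp only [h, Bool.false_eq_true, if_false]
      exact ih _

-- A's interval loop and the r ≥ 0 form build the same list.
lemma pv_iv_fold_eq (y : Int) (sb : List ((Int × Int) × (Int × Int))) (acc : List (Int × Int)) :
    sb.foldl (fun (acc : List (Int × Int)) p =>
        if |p.1.2 - y| ≤ |p.1.1 - p.2.1| + |p.1.2 - p.2.2| then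
          acc ++ [(p.1.1 - (|p.1.1 - p.2.1| + |p.1.2 - p.2.2| - |p.1.2 - y|),
                   p.1.1 + (|p.1.1 - p.2.1| + |p.1.2 - p.2.2| - |p.1.2 - y|))]
        else acc) acc
    = sb.foldl (fun (acc : List (Int × Int)) p =>
        let r := |p.1.1 - p.2.1| + |p.1.2 - p.2.2| - |p.1.2 - y|
        if r ≥ 0 then acc ++ [(p.1.1 - r, p.1.1 + r)] else acc) acc := by
  induction sb generalizing acc with
  | nil => rfl
  | cons hd tl ih =>
    simp only [List.foldl_cons]
    rw [← ih]
    congr 1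
    by_cases h : |hd.1.2 - y| ≤ |hd.1.1 - hd.2.1| + |hd.1.2 - hd.2.2|
    · rw [if_pos h, if_pos (by omega)]
    · rw [if_neg h, if_neg (by omega)]

-- every interval produced by the pair loop satisfies lo ≤ hi
lemma pv_iv_bounds (y : Int) (sb : List ((Int × Int) × (Int × Int))) (acc : List (Int × Int))
    (hacc : ∀ p ∈ acc, p.1 ≤ p.2) :
    ∀ p ∈ sb.foldl (fun (acc : List (Int × Int)) p =>
        let r := |p.1.1 - p.2.1| + |p.1.2 - p.2.2| - |p.1.2 - y|
        if r ≥ 0 then acc ++ [(p.1.1 - r, p.1.1 + r)] else acc) acc,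
      p.1 ≤ p.2 := by
  induction sb generalizing acc with
  | nil => exact hacc
  | cons hd tl ih =>
    simp only [List.foldl_cons]
    apply ih
    intro p hp
    split at hp
    · rcases List.mem_append.mp hp with h | h
      · exact hacc p h
      · rename_i hr
        simp only [List.mem_singleton] at h
        subst h
        simp only
        omega
    · exact hacc p hp

-- B's event loop is the interval loop followed by flattening each interval into its two events.
lemma pv_ev_fold (y : Int) (sb : List ((Int × Int) × (Int × Int))) (accIv : List (Int × Int)) :
    sb.foldl (fun (acc : List (Int × Int)) p =>
        let r := |p.1.1 - p.2.1| + |p.1.2 - p.2.2| - |p.1.2 - y|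
        if r ≥ 0 then acc ++ [(p.1.1 - r, 1)] ++ [(p.1.1 + r + 1, -1)] else acc)
      (accIv.flatMap pvEv)
    = (sb.foldl (fun (acc : List (Int × Int)) p =>
        let r := |p.1.1 - p.2.1| + |p.1.2 - p.2.2| - |p.1.2 - y|
        if r ≥ 0 then acc ++ [(p.1.1 - r, p.1.1 + r)] else acc) accIv).flatMap pvEv := by
  induction sb generalizing accIv with
  | nil => rfl
  | cons hd tl ih =>
    simp only [List.foldl_cons]
    by_cases h : (0:Int) ≤ |hd.1.1 - hd.2.1| + |hd.1.2 - hd.2.2| - |hd.1.2 - y|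
    · rw [if_pos h, if_pos h, show (accIv.flatMap pvEv) ++ [(hd.1.1 - _, 1)] ++ [(hd.1.1 + _ + 1, -1)]
        = (accIv ++ [(hd.1.1 - (|hd.1.1 - hd.2.1| + |hd.1.2 - hd.2.2| - |hd.1.2 - y|),
            hd.1.1 + (|hd.1.1 - hd.2.1| + |hd.1.2 - hd.2.2| - |hd.1.2 - y|))]).flatMap pvEv
        from by simp [pvEv]]
      exact ih _
    · rw [if_neg h, if_neg h]
      exact ih _


-- insertion sort produces a Pairwise-ordered list for a total asymmetric transitive "before"
lemma pv_insertBy_pairwise {α : Type} (before : α → α → Bool)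
    (htot : ∀ a b, before a b = false ∨ before b a = false)
    (htrans : ∀ a b c, before b a = false → before c b = false → before c a = false)
    (x : α) (ys : List α) (h : ys.Pairwise (fun a b => before b a = false)) :
    (PySem.List.insertBy before x ys).Pairwise (fun a b => before b a = false) := by
  induction ys with
  | nil => simp [PySem.List.insertBy]
  | cons y ys ih =>
    rw [List.pairwise_cons] at h
    obtain ⟨hy, hys⟩ := h
    show (if before x y = true then x :: y :: ys else y :: PySem.List.insertBy before x ys).Pairwise _
    by_cases hxy : before x y = true
    · rw [if_pos hxy]
      have hyx : before y x = false := by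
        rcases htot x y with h | h
        · rw [hxy] at h; exact absurd h (by simp)
        · exact h
      refine List.Pairwise.cons ?_ (List.Pairwise.cons hy hys)
      intro z hz
      rcases List.mem_cons.mp hz with rfl | hz'
      · exact hyx
      · exact htrans _ _ _ hyx (hy z hz')
    · rw [if_neg hxy]
      refine List.Pairwise.cons ?_ (ih hys)
      intro z hz
      rcases (PySem.List.mem_insertBy before x z _).mp hz with rfl | hz'
      · simpa using hxy
      · exact hy z hz'

lemma pv_foldl_insertBy_pairwise {α : Type} (before : α → α → Bool)
    (htot : ∀ a b, before a b = false ∨ before b a = false)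
    (htrans : ∀ a b c, before b a = false → before c b = false → before c a = false)
    (xs : List α) (acc : List α) (h : acc.Pairwise (fun a b => before b a = false)) :
    (xs.foldl (fun acc x => PySem.List.insertBy before x acc) acc).Pairwise
      (fun a b => before b a = false) := by
  induction xs generalizing acc with
  | nil => exact h
  | cons x xs ih => exact ih _ (pv_insertBy_pairwise before htot htrans x acc h)

-- sorted2 by (fst, snd) over Int pairs is Pairwise lexLe
lemma pv_sorted2_pairwise (xs : List (Int × Int)) :
    (PySem.List.sorted2 xs (fun p => p.1) (fun p => p.2)).Pairwise lexLe := by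
  have h := pv_foldl_insertBy_pairwise
    (fun a b : Int × Int => decide (a.1 < b.1) || (!decide (b.1 < a.1) && decide (a.2 < b.2)))
    (by intro a b; by_cases h1 : a.1 < b.1 <;> by_cases h2 : b.1 < a.1 <;>
        by_cases h3 : a.2 < b.2 <;> by_cases h4 : b.2 < a.2 <;> simp_all <;> omega)
    (by intro a b c h1 h2; simp only [Bool.or_eq_false_iff, Bool.and_eq_false_iff,
          decide_eq_false_iff_not, Bool.not_eq_false', decide_eq_true_eq] at *
        constructor
        · omega
        · rcases h1.2 with h | h <;> rcases h2.2 with h' | h' <;> [left; left; left; right] <;> omega)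
    xs [] (by simp)
  refine h.imp ?_
  intro a b hab
  simp only [Bool.or_eq_false_iff, Bool.and_eq_false_iff, decide_eq_false_iff_not,
    Bool.not_eq_false', decide_eq_true_eq] at hab
  unfold lexLe
  omega

lemma pv_pairwise_fst {es : List (Int × Int)} (h : es.Pairwise lexLe) :
    es.Pairwise (fun a b => a.1 ≤ b.1) := h.imp (fun hab => by unfold lexLe at hab; omega)

lemma pv_lastX_ge {es : List (Int × Int)} (h : es.Pairwise (fun a b => a.1 ≤ b.1)) :
    ∀ e ∈ es, e.1 ≤ lastX es := by
  induction es with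
  | nil => simp
  | cons a t ih =>
    rw [List.pairwise_cons] at h
    intro e he
    cases t with
    | nil =>
      rcases List.mem_cons.mp he with rfl | h' 
      · simp [lastX]
      · simp at h'
    | cons b t' =>
      have hl : lastX (a :: b :: t') = lastX (b :: t') := by
        simp [lastX, List.getLast?]
      rw [hl]
      rcases List.mem_cons.mp he with rfl | h'
      · exact le_trans (h.1 b (by simp)) (ih h.2 b (by simp))
      · exact ih h.2 e h'


-- the sweep loop computes gsum, given nonnegative prefix depths summing to zero
lemma pv_sweep_eq_gsum : ∀ (es : List (Int × Int)) (t d s : Int), 0 ≤ d →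
    (∀ p q, es = p ++ q → 0 ≤ d + sumD p) → d + sumD es = 0 →
    (es.foldl pvSweepStep (t, d, s)).1
      = t + (if 0 < d then headX es - s else 0) + gsum es d := by
  intro es
  induction es with
  | nil =>
    intro t d s hd hpre htot
    have : d = 0 := by simp [sumD] at htot; omega
    simp [this, gsum]
  | cons e rest ih =>
    intro t d s hd hpre htot
    obtain ⟨x, dx⟩ := e
    have hd' : 0 ≤ d + dx := by
      have := hpre [(x, dx)] rest rfl
      simpa [sumD] using this
    have hstep : pvSweepStep (t, d, s) (x, dx)
        = (if d + dx == 0 then t + (x - (if d == 0 then x else s)) else t, d + dx,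
           if d == 0 then x else s) := rfl
    rw [List.foldl_cons, hstep]
    cases rest with
    | nil =>
      have hdz : d + dx = 0 := by
        simp only [sumD, List.map_cons, List.map_nil, List.sum_cons, List.sum_nil] at htot
        omega
      have hg : gsum [(x, dx)] d = 0 := rfl
      simp only [List.foldl_nil, hg, headX, beq_iff_eq]
      split_ifs <;> omega
    | cons e2 r =>
      obtain ⟨x2, d2⟩ := e2
      have hpre' : ∀ p q, (x2, d2) :: r = p ++ q → 0 ≤ (d + dx) + sumD p := by
        intro p q hpq
        have := hpre ((x, dx) :: p) q (by simp [hpq])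
        simp only [sumD, List.map_cons, List.sum_cons] at this ⊢
        omega
      have htot' : (d + dx) + sumD ((x2, d2) :: r) = 0 := by
        simp only [sumD, List.map_cons, List.sum_cons] at htot ⊢
        omega
      rw [ih _ (d + dx) _ hd' hpre' htot']
      have hgs : gsum ((x, dx) :: (x2, d2) :: r) d
          = (if 0 < d + dx then x2 - x else 0) + gsum ((x2, d2) :: r) (d + dx) := rfl
      rw [hgs]
      simp only [headX, beq_iff_eq]
      generalize gsum ((x2, d2) :: r) (d + dx) = G
      split_ifs <;> omega

lemma pv_sumD_flatMap (ivs : List (Int × Int)) : sumD (ivs.flatMap pvEv) = 0 := by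
  induction ivs with
  | nil => rfl
  | cons iv t ih => simp [pvEv, sumD] at ih ⊢; omega

lemma pv_sumD_perm {l1 l2 : List (Int × Int)} (h : l1.Perm l2) : sumD l1 = sumD l2 :=
  (h.map Prod.snd).sum_eq

lemma pv_sumD_counts (p : List (Int × Int)) (h : ∀ e ∈ p, e.2 = 1 ∨ e.2 = -1) :
    sumD p = (p.countP (fun e => decide (e.2 = 1)) : Int)
      - (p.countP (fun e => decide (e.2 = -1)) : Int) := by
  induction p with
  | nil => simp [sumD]
  | cons e t ih =>
    have he := h e (by simp)
    have ht := ih (fun e' he' => h e' (List.mem_cons_of_mem _ he'))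
    simp only [sumD, List.map_cons, List.sum_cons, List.countP_cons] at *
    rcases he with h1 | h1 <;> simp [h1, ht] <;> omega

lemma pv_mem_ev_d {ivs : List (Int × Int)} {e : Int × Int} (h : e ∈ ivs.flatMap pvEv) :
    e.2 = 1 ∨ e.2 = -1 := by
  rcases List.mem_flatMap.mp h with ⟨iv, _, hm⟩
  simp only [pvEv] at hm
  rcases List.mem_cons.mp hm with rfl | hm2
  · left; rfl
  · rcases List.mem_cons.mp hm2 with rfl | hm3
    · right; rfl
    · simp at hm3

lemma pv_countP_flat_open (ivs : List (Int × Int)) (x0 : Int) :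
    (ivs.flatMap pvEv).countP (fun e => decide (e.2 = 1 ∧ e.1 < x0))
      = ivs.countP (fun iv => decide (iv.1 < x0)) := by
  induction ivs with
  | nil => rfl
  | cons iv t ih =>
    simp only [List.flatMap_cons, List.countP_append, List.countP_cons, ih, pvEv]
    simp
    omega

lemma pv_countP_flat_close (ivs : List (Int × Int)) (x0 : Int) :
    (ivs.flatMap pvEv).countP (fun e => decide (e.2 = -1 ∧ e.1 ≤ x0))
      = ivs.countP (fun iv => decide (iv.2 + 1 ≤ x0)) := by
  induction ivs with
  | nil => rfl
  | cons iv t ih =>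
    simp only [List.flatMap_cons, List.countP_append, List.countP_cons, ih, pvEv]
    simp
    omega

-- every prefix of the sorted event list has nonnegative depth sum
lemma pv_prefix_nonneg (ivs : List (Int × Int)) (hb : ∀ iv ∈ ivs, iv.1 ≤ iv.2)
    (p q : List (Int × Int))
    (hsplit : PySem.List.sorted2 (ivs.flatMap pvEv) (fun e => e.1) (fun e => e.2) = p ++ q) :
    0 ≤ sumD p := by
  set es := PySem.List.sorted2 (ivs.flatMap pvEv) (fun e => e.1) (fun e => e.2) with hes
  have hperm : es.Perm (ivs.flatMap pvEv) := PySem.List.sorted2_perm _ _ _ _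
  have hpair : es.Pairwise lexLe := pv_sorted2_pairwise _
  have hmemd : ∀ e ∈ p, e.2 = 1 ∨ e.2 = -1 := by
    intro e he
    exact pv_mem_ev_d (hperm.mem_iff.mp (by rw [hsplit]; exact List.mem_append_left _ he))
  cases q with
  | nil =>
    have hp : p = es := by simpa using hsplit.symm
    rw [hp, pv_sumD_perm hperm, pv_sumD_flatMap]
  | cons e0 q' =>
    obtain ⟨x0, d0⟩ := e0
    rw [hsplit] at hpair
    rw [List.pairwise_append] at hpair
    have hple : ∀ a ∈ p, lexLe a (x0, d0) := fun a ha => hpair.2.2 a ha _ (by simp)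
    have hqge : ∀ b ∈ (x0, d0) :: q', x0 ≤ b.1 := by
      intro b hb'
      rcases List.mem_cons.mp hb' with rfl | hb'
      · simp
      · have := (List.pairwise_cons.mp hpair.2.1).1 b hb'
        unfold lexLe at this; omega
    -- closes in p
    have hA1 : p.countP (fun e => decide (e.2 = -1))
        ≤ ivs.countP (fun iv => decide (iv.2 + 1 ≤ x0)) := by
      rw [← pv_countP_flat_close, ← hperm.countP_eq, hsplit, List.countP_append]
      have : p.countP (fun e => decide (e.2 = -1))
          = p.countP (fun e => decide (e.2 = -1 ∧ e.1 ≤ x0)) := by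
        apply List.countP_congr
        intro e he
        have := hple e he
        unfold lexLe at this
        simp only [decide_eq_true_eq]
        constructor
        · intro h1; exact ⟨h1, by omega⟩
        · intro h1; exact h1.1
      omega
    -- opens below x0 are all in p
    have hA2 : ivs.countP (fun iv => decide (iv.1 < x0))
        ≤ p.countP (fun e => decide (e.2 = 1)) := by
      rw [← pv_countP_flat_open, ← hperm.countP_eq, hsplit, List.countP_append]
      have hq0 : ((x0, d0) :: q').countP (fun e => decide (e.2 = 1 ∧ e.1 < x0)) = 0 := by
        rw [List.countP_eq_zero]
        intro b hb'
        have := hqge b hb'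
        simp only [decide_eq_true_eq]
        intro h1
        omega
      have hmono : p.countP (fun e => decide (e.2 = 1 ∧ e.1 < x0))
          ≤ p.countP (fun e => decide (e.2 = 1)) := by
        apply List.countP_mono_left
        intro e _ h1
        simp only [decide_eq_true_eq] at h1 ⊢
        exact h1.1
      omega
    have hA3 : ivs.countP (fun iv => decide (iv.2 + 1 ≤ x0))
        ≤ ivs.countP (fun iv => decide (iv.1 < x0)) := by
      apply List.countP_mono_left
      intro iv hiv h1
      have := hb iv hiv
      simp only [decide_eq_true_eq] at h1 ⊢
      omega
    rw [pv_sumD_counts p hmemd]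
    omega


-- gsum over a sorted event list counts the points of positive running coverage
lemma pv_gsum_card : ∀ (rest : List (Int × Int)) (x1 d1 d0 : Int),
    ((x1, d1) :: rest).Pairwise (fun a b => a.1 ≤ b.1) →
    gsum ((x1, d1) :: rest) d0
      = (((Finset.Ico x1 (lastX ((x1, d1) :: rest))).filter
            (fun x => 0 < cAt ((x1, d1) :: rest) d0 x)).card : Int) := by
  intro rest
  induction rest with
  | nil =>
    intro x1 d1 d0 _
    have : lastX [(x1, d1)] = x1 := rfl
    simp [gsum, this]
  | cons e2 r ih =>
    intro x1 d1 d0 hp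
    obtain ⟨x2, d2⟩ := e2
    have hp' : ((x2, d2) :: r).Pairwise (fun a b => a.1 ≤ b.1) := (List.pairwise_cons.mp hp).2
    have h12 : x1 ≤ x2 := (List.pairwise_cons.mp hp).1 (x2, d2) (by simp)
    have hrest_ge : ∀ e ∈ (x2, d2) :: r, x2 ≤ e.1 := by
      intro e he
      rcases List.mem_cons.mp he with rfl | he'
      · simp
      · exact (List.pairwise_cons.mp hp').1 e he'
    have h2l : x2 ≤ lastX ((x2, d2) :: r) := pv_lastX_ge hp' (x2, d2) (by simp)
    have hlast : lastX ((x1, d1) :: (x2, d2) :: r) = lastX ((x2, d2) :: r) := by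
      simp [lastX, List.getLast?]
    have hgs : gsum ((x1, d1) :: (x2, d2) :: r) d0
        = (if 0 < d0 + d1 then x2 - x1 else 0) + gsum ((x2, d2) :: r) (d0 + d1) := rfl
    -- coverage agreement
    have hcA : ∀ x : Int, x1 ≤ x →
        cAt ((x1, d1) :: (x2, d2) :: r) d0 x = cAt ((x2, d2) :: r) (d0 + d1) x := by
      intro x hx
      simp only [cAt, List.filter_cons, decide_eq_true_eq, sumD]
      rw [if_pos (by simpa using hx)]
      simp only [List.map_cons, List.sum_cons]
      ring
    have hclo : ∀ x : Int, x1 ≤ x → x < x2 →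
        cAt ((x1, d1) :: (x2, d2) :: r) d0 x = d0 + d1 := by
      intro x hx hx2
      rw [hcA x hx]
      have hfil : ((x2, d2) :: r).filter (fun e => decide (e.1 ≤ x)) = [] := by
        rw [List.filter_eq_nil_iff]
        intro e he
        have := hrest_ge e he
        simp only [decide_eq_true_eq]
        omega
      simp [cAt, hfil, sumD]
    rw [hgs, hlast, ih x2 d2 (d0 + d1) hp']
    have hsplit : Finset.Ico x1 (lastX ((x2, d2) :: r))
        = Finset.Ico x1 x2 ∪ Finset.Ico x2 (lastX ((x2, d2) :: r)) :=
      (Finset.Ico_union_Ico_eq_Ico h12 h2l).symm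
    rw [hsplit, Finset.filter_union, Finset.card_union_of_disjoint]
    · have hc1 : (Finset.Ico x1 x2).filter (fun x => 0 < cAt ((x1, d1) :: (x2, d2) :: r) d0 x)
          = (Finset.Ico x1 x2).filter (fun _ => 0 < d0 + d1) := by
        apply Finset.filter_congr
        intro x hx
        rw [Finset.mem_Ico] at hx
        rw [hclo x hx.1 hx.2]
      have hc2 : (Finset.Ico x2 (lastX ((x2, d2) :: r))).filter
            (fun x => 0 < cAt ((x1, d1) :: (x2, d2) :: r) d0 x)
          = (Finset.Ico x2 (lastX ((x2, d2) :: r))).filter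
            (fun x => 0 < cAt ((x2, d2) :: r) (d0 + d1) x) := by
        apply Finset.filter_congr
        intro x hx
        rw [Finset.mem_Ico] at hx
        rw [hcA x (by omega)]
      rw [hc1, hc2]
      by_cases hpos : 0 < d0 + d1
      · rw [if_pos hpos, Finset.filter_true_of_mem (fun _ _ => hpos)]
        push_cast [Int.card_Ico]
        omega
      · rw [if_neg hpos, Finset.filter_false_of_mem (fun _ _ => hpos)]
        simp
    · exact Finset.disjoint_filter_filter (Finset.Ico_disjoint_Ico_consecutive x1 x2 _)

-- running coverage at the sorted events equals the interval coverage count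
lemma pv_cAt_covN (ivs : List (Int × Int)) (hb : ∀ iv ∈ ivs, iv.1 ≤ iv.2) (x : Int) :
    cAt (PySem.List.sorted2 (ivs.flatMap pvEv) (fun e => e.1) (fun e => e.2)) 0 x
      = (covN ivs x : Int) := by
  have hperm : (PySem.List.sorted2 (ivs.flatMap pvEv) (fun e => e.1) (fun e => e.2)).Perm
      (ivs.flatMap pvEv) := PySem.List.sorted2_perm _ _ _ _
  unfold cAt
  rw [pv_sumD_perm (hperm.filter _)]
  rw [zero_add]
  induction ivs with
  | nil => simp [sumD, covN]
  | cons iv t ih =>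
    have hbt : ∀ p ∈ t, p.1 ≤ p.2 := fun p hp => hb p (List.mem_cons_of_mem _ hp)
    have hiv := hb iv (by simp)
    simp only [List.flatMap_cons, List.filter_append, pvEv, covN, List.countP_cons] at *
    rw [sumD, List.map_append, List.sum_append, ← sumD, ← sumD, ih hbt (PySem.List.sorted2_perm _ _ _ _)]
    have : sumD (List.filter (fun e => decide (e.1 ≤ x)) [(iv.1, 1), (iv.2 + 1, -1)])
        = if iv.1 ≤ x ∧ x ≤ iv.2 then 1 else 0 := by
      simp only [List.filter_cons, List.filter_nil, decide_eq_true_eq]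
      split_ifs <;> simp [sumD] <;> omega
    rw [this]
    simp only [decide_eq_true_eq]
    split_ifs <;> push_cast <;> omega


-- counting step: appending one interval to the processed list adds exactly [cut, iv.2]
lemma pv_cnt_step (P : List (Int × Int)) (iv : Int × Int) (L R cut : Int)
    (_hiv : iv.1 ≤ iv.2) (hL : L ≤ iv.1) (hR : iv.2 < R) (hcut : iv.1 ≤ cut)
    (hcov : ∀ x : Int, iv.1 ≤ x → x + 1 ≤ cut → 0 < covN P x)
    (hun : ∀ x : Int, cut ≤ x → covN P x = 0) :
    (((Finset.Ico L R).filter (fun x => 0 < covN (P ++ [iv]) x)).card : Int)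
      = (((Finset.Ico L R).filter (fun x => 0 < covN P x)).card : Int)
        + (if iv.2 ≥ cut then iv.2 - cut + 1 else 0) := by
  have hN : ∀ x : Int, covN (P ++ [iv]) x
      = covN P x + (if iv.1 ≤ x ∧ x ≤ iv.2 then 1 else 0) := by
    intro x
    simp only [covN, List.countP_append, List.countP_cons, List.countP_nil,
      decide_eq_true_eq]
    split_ifs <;> omega
  have hset : (Finset.Ico L R).filter (fun x => 0 < covN (P ++ [iv]) x)
      = ((Finset.Ico L R).filter (fun x => 0 < covN P x)) ∪ Finset.Icc cut iv.2 := by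
    ext x
    simp only [Finset.mem_filter, Finset.mem_union, Finset.mem_Ico, Finset.mem_Icc, hN]
    constructor
    · rintro ⟨⟨hlx, hxr⟩, hpos⟩
      by_cases hp : 0 < covN P x
      · exact Or.inl ⟨⟨hlx, hxr⟩, hp⟩
      · right
        have hz : covN P x = 0 := by omega
        split_ifs at hpos with hin
        · constructor
          · by_contra hlt
            have := hcov x hin.1 (by omega)
            omega
          · exact hin.2
        · omega
    · rintro (⟨hx, hp⟩ | ⟨hcx, hx2⟩)
      · exact ⟨hx, by split_ifs <;> omega⟩
      · refine ⟨⟨by omega, by omega⟩, ?_⟩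
        rw [if_pos ⟨by omega, hx2⟩]
        omega
  rw [hset, Finset.card_union_of_disjoint]
  · push_cast [Int.card_Icc]
    split_ifs <;> omega
  · rw [Finset.disjoint_right]
    intro x hx hmem
    rw [Finset.mem_Icc] at hx
    rw [Finset.mem_filter] at hmem
    have := hun x hx.1
    omega

-- the inline merge fold computes the coverage count of all intervals
lemma pv_inline_card : ∀ (T P : List (Int × Int)) (t : Int) (eo : Option Int) (L R : Int),
    t = (((Finset.Ico L R).filter (fun x => 0 < covN P x)).card : Int) →
    (match eo with
     | none => P = []
     | some e => (∃ m ∈ P, m.2 = e) ∧ ∀ p ∈ P, p.2 ≤ e) →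
    (∀ a ∈ P, ∀ b ∈ T, a.1 ≤ b.1) →
    T.Pairwise (fun a b => a.1 ≤ b.1) →
    (∀ iv ∈ T, iv.1 ≤ iv.2 ∧ L ≤ iv.1 ∧ iv.2 < R) →
    (T.foldl pvMergeStep (t, eo)).1
      = (((Finset.Ico L R).filter (fun x => 0 < covN (P ++ T) x)).card : Int) := by
  intro T
  induction T with
  | nil =>
    intro P t eo L R ht _ _ _ _
    simpa using ht
  | cons iv T' ih =>
    intro P t eo L R ht heo hPT hTp hbox
    obtain ⟨hiv, hL, hR⟩ := hbox iv (by simp)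
    have hPiv : ∀ a ∈ P, a.1 ≤ iv.1 := fun a ha => hPT a ha iv (by simp)
    rw [List.foldl_cons]
    have hstep : ∃ cut : Int, pvMergeStep (t, eo) iv
          = (if iv.2 ≥ cut then t + (iv.2 - cut + 1) else t,
             some (match eo with | none => iv.2 | some e => max e iv.2))
        ∧ iv.1 ≤ cut
        ∧ (∀ x : Int, iv.1 ≤ x → x + 1 ≤ cut → 0 < covN P x)
        ∧ (∀ x : Int, cut ≤ x → covN P x = 0) := by
      cases eo with
      | none =>
        refine ⟨iv.1, ?_, le_refl _, ?_, ?_⟩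
        · rfl
        · intro x h1 h2; omega
        · intro x _
          rw [heo]
          rfl
      | some e =>
        obtain ⟨⟨m, hm, hme⟩, hall⟩ := heo
        refine ⟨max iv.1 (e + 1), ?_, le_max_left _ _, ?_, ?_⟩
        · show (_, if iv.2 > e then some iv.2 else some e) = _
          have : (if iv.2 > e then some iv.2 else some e) = some (max e iv.2) := by
            split_ifs <;> simp <;> omega
          rw [this]
        · intro x h1 h2
          have hx2 : x ≤ e := by omega
          unfold covN
          rw [List.countP_pos_iff]
          exact ⟨m, hm, by simp only [decide_eq_true_eq]; exact ⟨le_trans (hPiv m hm) h1, by omega⟩⟩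
        · intro x hx
          unfold covN
          rw [List.countP_eq_zero]
          intro p hp
          have := hall p hp
          simp only [decide_eq_true_eq]
          intro hc
          omega
    obtain ⟨cut, hst, hcut, hcov, hun⟩ := hstep
    rw [hst]
    have hcnt := pv_cnt_step P iv L R cut hiv hL hR hcut hcov hun
    have happ : P ++ iv :: T' = (P ++ [iv]) ++ T' := by simp
    rw [happ]
    apply ih (P ++ [iv]) _ _ L R
    · rw [hcnt, ← ht]
      split_ifs <;> omega
    · constructor
      · cases eo with
        | none => exact ⟨iv, by simp, by simp⟩
        | some e =>
          obtain ⟨⟨m, hm, hme⟩, hall⟩ := heo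
          by_cases h : e ≤ iv.2
          · exact ⟨iv, by simp, by simp; omega⟩
          · exact ⟨m, by simp [hm], by simp; omega⟩
      · intro p hp
        rcases List.mem_append.mp hp with hp' | hp'
        · cases eo with
          | none => simp [heo] at hp'
          | some e =>
            have := heo.2 p hp'
            simp only []
            omega
        · simp at hp'
          subst hp'
          cases eo <;> simp
    · intro a ha b hb
      rcases List.mem_append.mp ha with ha' | ha'
      · exact hPT a ha' b (List.mem_cons_of_mem _ hb)
      · simp at ha'
        subst ha'
        exact (List.pairwise_cons.mp hTp).1 b hb
    · exact (List.pairwise_cons.mp hTp).2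
    · intro b hb
      exact hbox b (List.mem_cons_of_mem _ hb)

-- ===== VERDICT (by name: the statement is the Claim_ definition above) =====

-- the full event-sweep value equals the coverage count of the produced intervals
lemma pv_sweep_total (ivs : List (Int × Int)) (hbnd : ∀ p ∈ ivs, p.1 ≤ p.2) :
    ((PySem.List.sorted2 (ivs.flatMap pvEv) (fun e => e.1) (fun e => e.2)).foldl
        pvSweepStep (0, 0, 0)).1
      = ((PySem.List.sorted2 ivs (fun p => p.1) (fun p => p.2)).foldl
          pvMergeStep (0, none)).1 := by
  set es := PySem.List.sorted2 (ivs.flatMap pvEv) (fun e => e.1) (fun e => e.2) with hes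
  have hperm : es.Perm (ivs.flatMap pvEv) := PySem.List.sorted2_perm _ _ _ _
  set ST := PySem.List.sorted2 ivs (fun p => p.1) (fun p => p.2) with hST
  have hSTperm : ST.Perm ivs := PySem.List.sorted2_perm _ _ _ _
  cases hcase : es with
  | nil =>
    have hivs : ivs = [] := by
      cases ivs with
      | nil => rfl
      | cons iv t =>
        have := hperm.length_eq
        rw [hcase] at this
        simp [pvEv] at this
    subst hivs
    have hSTnil : ST = [] := hSTperm.eq_nil
    rw [hSTnil]
    rfl
  | cons e1 restE =>
    obtain ⟨x1, d1⟩ := e1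
    have hpairE : es.Pairwise lexLe := pv_sorted2_pairwise _
    have hminE : ∀ e ∈ es, x1 ≤ e.1 := by
      intro e he
      rw [hcase] at he
      rcases List.mem_cons.mp he with rfl | he'
      · exact le_refl _
      · have hp := pv_pairwise_fst hpairE
        rw [hcase] at hp
        exact (List.pairwise_cons.mp hp).1 e he'
    have hmaxE : ∀ e ∈ es, e.1 ≤ lastX es := pv_lastX_ge (pv_pairwise_fst hpairE)
    -- B side: sweep = gsum = coverage card
    have hsweep : (es.foldl pvSweepStep (0, 0, 0)).1 = gsum es 0 := by
      rw [pv_sweep_eq_gsum es 0 0 0 (le_refl _)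
        (fun p q hpq => by
          have := pv_prefix_nonneg ivs hbnd p q (by rw [← hes]; exact hpq)
          omega)
        (by rw [pv_sumD_perm hperm, pv_sumD_flatMap, add_zero])]
      simp
    have hgsum : gsum es 0
        = (((Finset.Ico x1 (lastX es)).filter (fun x => 0 < covN ivs x)).card : Int) := by
      rw [hcase, pv_gsum_card restE x1 d1 0 (by rw [← hcase]; exact pv_pairwise_fst hpairE)]
      rw [← hcase]
      congr 1
      apply congrArg
      apply Finset.filter_congr
      intro x _
      rw [hes, pv_cAt_covN ivs hbnd x]
      exact Int.natCast_pos
    -- A side: inline merge = coverage card over the same box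
    have hmerge : (ST.foldl pvMergeStep (0, none)).1
        = (((Finset.Ico x1 (lastX es)).filter (fun x => 0 < covN ivs x)).card : Int) := by
      have hbox : ∀ iv ∈ ST, iv.1 ≤ iv.2 ∧ x1 ≤ iv.1 ∧ iv.2 < lastX es := by
        intro iv hiv
        have hmem : iv ∈ ivs := hSTperm.mem_iff.mp hiv
        have hop : (iv.1, (1:Int)) ∈ es :=
          hperm.mem_iff.mpr (List.mem_flatMap.mpr ⟨iv, hmem, by simp [pvEv]⟩)
        have hcl : (iv.2 + 1, (-1:Int)) ∈ es :=
          hperm.mem_iff.mpr (List.mem_flatMap.mpr ⟨iv, hmem, by simp [pvEv]⟩)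
        refine ⟨hbnd iv hmem, by simpa using hminE _ hop, ?_⟩
        have := hmaxE _ hcl
        simp only at this
        omega
      have := pv_inline_card ST [] 0 none x1 (lastX es)
        (by simp [covN]) rfl (by simp) (pv_pairwise_fst (pv_sorted2_pairwise ivs)) hbox
      rw [this]
      congr 1
      apply congrArg
      apply Finset.filter_congr
      intro x _
      unfold covN
      rw [List.nil_append, hSTperm.countP_eq]
    rw [← hcase, hsweep, hgsum, hmerge]

theorem impossible_beacon_locations_spec : Claim_equal_impossible_beacon_locations := by
  intro sb y _
  show impossible_beacon_locations sb y = impossible_beacon_locations_alt sb y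
  unfold impossible_beacon_locations impossible_beacon_locations_alt
  simp only [pvManhattan]
  rw [PySem.List.foldl_prod_mk
    (fun (s : PySem.Set Int) p => if p.2.2 == y then PySem.Set.add s p.2.1 else s)
    (fun (acc : List (Int × Int)) p =>
        if |p.1.2 - y| ≤ |p.1.1 - p.2.1| + |p.1.2 - p.2.2| then
          acc ++ [(p.1.1 - (|p.1.1 - p.2.1| + |p.1.2 - p.2.2| - |p.1.2 - y|),
                   p.1.1 + (|p.1.1 - p.2.1| + |p.1.2 - p.2.2| - |p.1.2 - y|))]
        else acc)
    sb PySem.Set.empty []]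
  rw [pv_set_eq y sb PySem.Set.empty, pv_iv_fold_eq y sb []]
  set ivs := sb.foldl (fun (acc : List (Int × Int)) p =>
      let r := |p.1.1 - p.2.1| + |p.1.2 - p.2.2| - |p.1.2 - y|
      if r ≥ 0 then acc ++ [(p.1.1 - r, p.1.1 + r)] else acc) [] with hivs
  have hbnd : ∀ p ∈ ivs, p.1 ≤ p.2 := pv_iv_bounds y sb [] (by simp)
  have hev : sb.foldl (fun (acc : List (Int × Int)) p =>
      let r := |p.1.1 - p.2.1| + |p.1.2 - p.2.2| - |p.1.2 - y|
      if r ≥ 0 then acc ++ [(p.1.1 - r, 1)] ++ [(p.1.1 + r + 1, -1)] else acc) []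
      = ivs.flatMap pvEv := by
    rw [hivs]
    have h0 : (([] : List (Int × Int)).flatMap pvEv) = [] := rfl
    conv_lhs => rw [← h0]
    exact pv_ev_fold y sb []
  rw [hev]
  -- A's joined-interval sum equals the inline merge total
  obtain ⟨hsum, -⟩ := pv_sweep_rel (PySem.List.sorted2 ivs (fun p => p.1) (fun p => p.2))
    (fun p hp => hbnd p ((PySem.List.sorted2_perm ivs _ _ _).mem_iff.mp hp)) [] (0, none)
    ⟨rfl, Or.inl ⟨rfl, rfl⟩⟩
  rw [pv_sumlen_foldl, pvGetJoinedIntervals, hsum]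
  rw [← pv_sweep_total ivs hbnd]
  rfl
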